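-- pv_equiv track=rewrite | github.com/jaymedq/indoor-tracker | tools/bib_audit.py | _strip_tex_comment
-- ===== SOURCE A (Python) =====
-- def _strip_tex_comment(line: str) -> str:
--     out = []
--     escaped = False
--     for ch in line:
--         if ch == "\\":
--             escaped = not escaped
--             out.append(ch)
--             continue
--         if ch == "%" and not escaped:
--             break
--         escaped = False
--         out.append(ch)
--     return "".join(out)
-- ===== SOURCE B (Python) =====
-- def _strip_tex_comment(line: str) -> str:
--     idx = 0
--     while True:
--         p = line.find('%', idx)
--         if p == -1:
--             return line
--         j = p
--         while j > 0 and line[j - 1] == '\\':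
--             j -= 1
--         if (p - j) % 2 == 0:
--             return line[:p]
--         idx = p + 1
-- ===== Notes on version B (the rewrite author's own statement) =====
-- stated objective: faster
-- what changed: Replaces A's forward char-by-char escape-state machine with jumping between comment-char occurrences via str.find and checking the parity of the backslash run immediately before each candidate.
import Mathlib
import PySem

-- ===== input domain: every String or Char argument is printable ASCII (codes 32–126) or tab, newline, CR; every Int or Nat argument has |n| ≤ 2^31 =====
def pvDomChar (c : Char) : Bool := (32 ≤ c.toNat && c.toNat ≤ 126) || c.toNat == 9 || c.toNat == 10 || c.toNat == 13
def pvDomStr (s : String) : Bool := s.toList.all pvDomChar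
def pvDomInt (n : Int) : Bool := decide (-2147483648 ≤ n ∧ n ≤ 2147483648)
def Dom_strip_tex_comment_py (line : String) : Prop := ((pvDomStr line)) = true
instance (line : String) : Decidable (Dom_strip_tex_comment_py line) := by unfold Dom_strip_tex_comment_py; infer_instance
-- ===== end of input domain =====

-- B replaces A's char-by-char escape-state machine by jumping between '%' candidates
-- (str.find) and checking the parity of the backslash run before each (constant-factor speedup: C-level str.find instead of a Python-level loop).

-- ===== PORT A =====
-- A's for-loop over the characters, carrying the 'escaped' flag; the 'break' becomes
-- returning [] (nothing more appended), appends become cons.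
def stripALoop : List Char → Bool → List Char
  | [], _ => []
  | c :: rest, escaped =>
    if c = '\\' then c :: stripALoop rest (!escaped)
    else if c = '%' ∧ escaped = false then []
    else c :: stripALoop rest false

def strip_tex_comment_py (line : String) : String :=
  String.ofList (stripALoop line.toList false)

-- ===== PORT B =====
-- port of line.find('%', idx): index of first '%' in the given suffix
def findPct : List Char → Option Nat
  | [] => none
  | c :: rest => if c = '%' then some 0 else (findPct rest).map (· + 1)

-- port of B's inner while-loop: length of the backslash run ending just before p
def backRun (cs : List Char) : Nat → Nat
  | 0 => 0
  | p + 1 => if cs.getD p ' ' = '\\' then backRun cs p + 1 else 0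

theorem findPct_lt_length {cs : List Char} {off : Nat} (h : findPct cs = some off) :
    off < cs.length := by
  induction cs generalizing off with
  | nil => simp [findPct] at h
  | cons c rest ih =>
    simp only [findPct] at h
    split at h
    · cases h; simp
    · cases hr : findPct rest with
      | none => simp [hr] at h
      | some o =>
        simp [hr] at h
        subst h
        simpa using Nat.succ_lt_succ (ih hr)

-- port of B's outer while-loop over candidate '%' positions
def stripBLoop (cs : List Char) (idx : Nat) : List Char :=
  match h : findPct (cs.drop idx) with
  | none => cs
  | some off =>
    let p := idx + off
    if backRun cs p % 2 = 0 then cs.take p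
    else stripBLoop cs (p + 1)
termination_by cs.length - idx
decreasing_by
  have := findPct_lt_length h
  simp [List.length_drop] at this
  omega

def strip_tex_comment_py_alt (line : String) : String :=
  String.ofList (stripBLoop line.toList 0)

-- ===== PRECONDITION & SPEC =====
def Spec_strip_tex_comment_py (line : String) (out : String) : Prop := out = strip_tex_comment_py_alt line
instance (line : String) (out : String) : Decidable (Spec_strip_tex_comment_py line out) := by unfold Spec_strip_tex_comment_py; infer_instance

-- ===== CLAIM (what is proved, stated in full; the proofs are below) =====
def Claim_equal_strip_tex_comment_py : Prop := ∀ (line : String), Dom_strip_tex_comment_py line → Spec_strip_tex_comment_py line (strip_tex_comment_py line)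

-- ===== LEMMAS AND PROOFS =====

-- 'odd' escape state corresponding to position i
def escAt (cs : List Char) (i : Nat) : Bool := backRun cs i % 2 = 1

theorem getD_drop' (cs : List Char) (n i : Nat) :
    (cs.drop n).getD i ' ' = cs.getD (n + i) ' ' := by
  simp [List.getD, List.getElem?_drop]

theorem findPct_spec_some {cs : List Char} {off : Nat} (h : findPct cs = some off) :
    cs.getD off ' ' = '%' ∧ ∀ i, i < off → cs.getD i ' ' ≠ '%' := by
  induction cs generalizing off with
  | nil => simp [findPct] at h
  | cons c rest ih =>
    simp only [findPct] at h
    split at h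
    · cases h
      simpa using ‹c = '%'›
    · cases hr : findPct rest with
      | none => simp [hr] at h
      | some o =>
        simp [hr] at h
        subst h
        obtain ⟨h1, h2⟩ := ih hr
        refine ⟨by simpa using h1, ?_⟩
        intro i hi
        cases i with
        | zero => simpa using ‹¬ c = '%'›
        | succ j => simpa using h2 j (by omega)

theorem findPct_spec_none {cs : List Char} (h : findPct cs = none) :
    ∀ i, i < cs.length → cs.getD i ' ' ≠ '%' := by
  induction cs with
  | nil => simp
  | cons c rest ih =>
    simp only [findPct] at h
    split at h
    · simp at h
    · cases hr : findPct rest with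
      | some o => simp [hr] at h
      | none =>
        intro i hi
        cases i with
        | zero => simpa using ‹¬ c = '%'›
        | succ j => simpa using ih hr j (by simpa using hi)

-- if there is no '%' in cs, A's loop copies everything
theorem stripALoop_no_pct (cs : List Char) (esc : Bool)
    (h : ∀ i, i < cs.length → cs.getD i ' ' ≠ '%') : stripALoop cs esc = cs := by
  induction cs generalizing esc with
  | nil => rfl
  | cons c rest ih =>
    have hc : c ≠ '%' := by simpa using h 0 (by simp)
    simp only [stripALoop]
    split
    · rw [ih (!esc) (fun i hi => by simpa using h (i + 1) (by simpa using hi))]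
    · rw [if_neg (by simp [hc]), ih false (fun i hi => by simpa using h (i + 1) (by simpa using hi))]

theorem escAt_succ_bs {cs : List Char} {i : Nat} (h : cs.getD i ' ' = '\\') :
    escAt cs (i + 1) = !escAt cs i := by
  simp only [escAt, backRun, h, if_pos]
  rcases Nat.mod_two_eq_zero_or_one (backRun cs i) with h2 | h2 <;> simp [Nat.add_mod, h2]

theorem escAt_succ_other {cs : List Char} {i : Nat} (h : cs.getD i ' ' ≠ '\\') :
    escAt cs (i + 1) = false := by
  have h' : cs[i]?.getD ' ' ≠ '\\' := h
  simp [escAt, backRun, h']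

-- one step of A's loop, phrased on the suffix starting at idx
theorem stripA_step {cs : List Char} {idx : Nat} (hlt : idx < cs.length) :
    cs.take idx ++ stripALoop (cs.drop idx) (escAt cs idx) =
      if cs.getD idx ' ' = '%' ∧ escAt cs idx = false then cs.take idx
      else cs.take (idx + 1) ++ stripALoop (cs.drop (idx + 1)) (escAt cs (idx + 1)) := by
  have hd : cs.drop idx = cs.getD idx ' ' :: cs.drop (idx + 1) := by
    rw [List.getD_eq_getElem cs ' ' hlt]
    exact (List.drop_eq_getElem_cons hlt)
  have ht : cs.take (idx + 1) = cs.take idx ++ [cs.getD idx ' '] := by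
    rw [List.getD_eq_getElem cs ' ' hlt]
    exact List.take_succ_eq_append_getElem hlt
  rw [hd, ht]
  simp only [stripALoop]
  by_cases hbs : cs.getD idx ' ' = '\\'
  · rw [if_pos hbs]
    have hne : ¬ (cs.getD idx ' ' = '%' ∧ escAt cs idx = false) := by
      rw [hbs]; simp
    rw [if_neg hne, escAt_succ_bs hbs]
    simp
  · rw [if_neg hbs]
    by_cases hpc : cs.getD idx ' ' = '%' ∧ escAt cs idx = false
    · rw [if_pos hpc, if_pos hpc]
      simp
    · rw [if_neg hpc, if_neg hpc, escAt_succ_other hbs]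
      simp

-- A's loop skips a '%'-free segment [idx, p)
theorem stripA_skip (cs : List Char) (p : Nat) (hp : p ≤ cs.length) :
    ∀ idx, idx ≤ p → (∀ i, idx ≤ i → i < p → cs.getD i ' ' ≠ '%') →
    cs.take idx ++ stripALoop (cs.drop idx) (escAt cs idx) =
      cs.take p ++ stripALoop (cs.drop p) (escAt cs p) := by
  intro idx hle hno
  induction hn : p - idx generalizing idx with
  | zero =>
    have : idx = p := by omega
    subst this; rfl
  | succ n ih =>
    have hlt : idx < cs.length := by omega
    rw [stripA_step hlt, if_neg (by intro h; exact hno idx le_rfl (by omega) h.1)]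
    exact ih (idx + 1) (by omega) (fun i h1 h2 => hno i (by omega) h2) (by omega)

-- B's loop equals A's loop resumed at idx with the matching escape state
theorem stripB_eq (cs : List Char) (idx : Nat) (hle : idx ≤ cs.length) :
    stripBLoop cs idx = cs.take idx ++ stripALoop (cs.drop idx) (escAt cs idx) := by
  rw [stripBLoop]
  split
  · next hnone =>
    rw [stripALoop_no_pct _ _ (by
      intro i hi
      have := findPct_spec_none hnone i (by simpa using hi)
      simpa [getD_drop'] using this)]
    simp
  · next off hsome =>
    have hofflt : off < cs.length - idx := by
      have := findPct_lt_length hsome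
      simpa using this
    obtain ⟨hpc, hno⟩ := findPct_spec_some hsome
    have hpc' : cs.getD (idx + off) ' ' = '%' := by
      rwa [getD_drop'] at hpc
    have hno' : ∀ i, idx ≤ i → i < idx + off → cs.getD i ' ' ≠ '%' := by
      intro i h1 h2
      have := hno (i - idx) (by omega)
      rw [getD_drop'] at this
      have hik : idx + (i - idx) = i := by omega
      rwa [hik] at this
    rw [stripA_skip cs (idx + off) (by omega) idx (by omega) hno']
    have hplt : idx + off < cs.length := by omega
    rw [stripA_step hplt]
    by_cases heven : backRun cs (idx + off) % 2 = 0
    · rw [if_pos heven, if_pos ⟨hpc', by simp [escAt]; omega⟩]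
    · rw [if_neg heven]
      have hesc : escAt cs (idx + off) = true := by simp [escAt]; omega
      rw [if_neg (by simp [hesc])]
      exact stripB_eq cs (idx + off + 1) (by omega)
termination_by cs.length - idx
decreasing_by omega

-- ===== VERDICT (by name: the statement is the Claim_ definition above) =====
theorem strip_tex_comment_py_spec : Claim_equal_strip_tex_comment_py := by
  intro line _
  unfold Spec_strip_tex_comment_py strip_tex_comment_py strip_tex_comment_py_alt
  rw [stripB_eq line.toList 0 (by omega)]
  simp [escAt, backRun]
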